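-- pv_equiv track=rewrite | github.com/Australian-Protein-Design-Initiative/nf-binder-design | bin/get_contigs.py | format_chimerax_selection
-- ===== SOURCE A (Python) =====
-- from typing import List, Tuple, Optional
-- from collections import defaultdict
--
-- def format_chimerax_selection(ranges: List[Tuple[str, int, int]]) -> str:
--     """Format ranges as a ChimeraX selection string.
--
--     Args:
--         ranges: List of (chain_id, start_res, end_res) tuples
--
--     Returns:
--         ChimeraX selection string like "@A:1-100 or @B:50-75"
--     """
--     if not ranges:
--         return ""
--
--     # Group ranges by chain ID
--     chain_groups = defaultdict(list)
--     for chain_id, start, end in ranges: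
--         chain_groups[chain_id].append((start, end))
--
--     # Format each chain's ranges
--     chain_selections = []
--     for chain_id in sorted(chain_groups.keys()):
--         ranges_list = sorted(chain_groups[chain_id])
--         # Combine consecutive or overlapping ranges on the same chain
--         range_parts = []
--         for start, end in ranges_list:
--             range_parts.append(f"{start}-{end}")
--         chain_selection = f"@{chain_id}:" + ",".join(range_parts)
--         chain_selections.append(chain_selection)
--
--     return " or ".join(chain_selections)
-- ===== SOURCE B (Python) =====
-- from typing import List, Tuple
-- from itertools import groupby
--
--
-- def format_chimerax_selection(ranges: List[Tuple[str, int, int]]) -> str: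
--     """Format ranges as a ChimeraX selection string.
--
--     One global sort puts the tuples in (chain, start, end) order; a single
--     groupby pass over the sorted list then emits each chain's selection.
--     """
--     srt = sorted(ranges)
--     return " or ".join(
--         f"@{chain_id}:" + ",".join(f"{s}-{e}" for _, s, e in grp)
--         for chain_id, grp in groupby(srt, key=lambda r: r[0])
--     )
-- ===== Notes on version B (the rewrite author's own statement) =====
-- stated objective: alternative
-- what changed: Replaced the defaultdict grouping plus per-chain key/value sorts by one global lexicographic sort of the tuples followed by a single groupby pass over the sorted list.
import Mathlib
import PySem

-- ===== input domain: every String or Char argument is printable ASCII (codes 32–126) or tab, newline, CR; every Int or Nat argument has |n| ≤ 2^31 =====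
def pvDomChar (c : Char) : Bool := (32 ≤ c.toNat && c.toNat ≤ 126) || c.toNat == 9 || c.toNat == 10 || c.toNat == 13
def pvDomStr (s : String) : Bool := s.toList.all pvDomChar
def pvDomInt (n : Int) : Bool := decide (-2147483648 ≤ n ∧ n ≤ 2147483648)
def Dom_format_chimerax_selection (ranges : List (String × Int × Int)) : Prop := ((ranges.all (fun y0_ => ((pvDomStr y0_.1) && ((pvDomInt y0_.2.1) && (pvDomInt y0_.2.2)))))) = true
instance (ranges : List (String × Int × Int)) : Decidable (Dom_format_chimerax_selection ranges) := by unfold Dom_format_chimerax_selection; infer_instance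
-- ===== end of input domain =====

-- B replaces A's defaultdict grouping by one global lexicographic sort followed by a single
-- groupby-style pass over the sorted list (objective: alternative decomposition, same cost class).

-- f"{start}-{end}"  (both Pythons format a pair this way)
def pvFmtPair (p : Int × Int) : String := PySem.Int.toStr p.1 ++ "-" ++ PySem.Int.toStr p.2

-- ===== PORT A =====
def format_chimerax_selection (ranges : List (String × Int × Int)) : String :=
  if ranges = [] then ""
  else
    -- chain_groups = defaultdict(list); chain_groups[chain_id].append((start, end))
    let chain_groups : PySem.Dict String (List (Int × Int)) :=
      ranges.foldl (fun d p => d.modify p.1 [] (fun l => l ++ [p.2])) PySem.Dict.empty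
    -- for chain_id in sorted(chain_groups.keys()): …
    let chain_selections : List String :=
      (PySem.List.sorted chain_groups.keys (fun c => c)).foldl (fun acc c =>
        let ranges_list := PySem.List.sorted (chain_groups.getD c []) (fun p => toLex p)
        let range_parts := ranges_list.foldl (fun ps p => ps ++ [pvFmtPair p]) []
        acc ++ ["@" ++ c ++ ":" ++ PySem.Str.join "," range_parts]) []
    PySem.Str.join " or " chain_selections

-- ===== PORT B =====
-- key of Python's sorted(ranges): tuple comparison = nested lexicographic order
def pvKeyB (r : String × Int × Int) : Lex (String × Lex (Int × Int)) := toLex (r.1, toLex r.2)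

def format_chimerax_selection_alt (ranges : List (String × Int × Int)) : String :=
  let srt := PySem.List.sorted ranges pvKeyB
  -- itertools.groupby(srt, key=r[0]) = maximal runs of equal chain id (List.splitBy);
  -- groupby's key value for a run is its head's chain id
  PySem.Str.join " or "
    ((srt.splitBy (fun a b => a.1 == b.1)).map (fun g =>
      "@" ++ (g.headD ("", 0, 0)).1 ++ ":" ++
      PySem.Str.join "," (g.map (fun r => pvFmtPair r.2))))

-- ===== PRECONDITION & SPEC =====
def Spec_format_chimerax_selection (ranges : List (String × Int × Int)) (out : String) : Prop := out = format_chimerax_selection_alt ranges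
instance (ranges : List (String × Int × Int)) (out : String) : Decidable (Spec_format_chimerax_selection ranges out) := by unfold Spec_format_chimerax_selection; infer_instance

-- ===== CLAIM (what is proved, stated in full; the proofs are below) =====
def Claim_equal_format_chimerax_selection : Prop := ∀ (ranges : List (String × Int × Int)), Dom_format_chimerax_selection ranges → Spec_format_chimerax_selection ranges (format_chimerax_selection ranges)

-- ===== LEMMAS AND PROOFS =====

-- Set.ofList keeps a subsequence (the first occurrences) of its input.
theorem pvOfList_sublist {α : Type} [BEq α] [LawfulBEq α] (xs : List α) :
    (PySem.Set.ofList xs).Sublist xs := by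
  induction xs with
  | nil => simp [PySem.Set.ofList_nil]
  | cons x xs ih =>
    rw [PySem.Set.ofList_cons]
    exact List.Sublist.cons₂ x ((List.filter_sublist).trans ih)

-- first-occurrence dedup of a ≤-pairwise list is <-pairwise
theorem pvOfList_pairwise_lt {α : Type} [BEq α] [LawfulBEq α] [LinearOrder α] (xs : List α)
    (h : List.Pairwise (· ≤ ·) xs) : List.Pairwise (· < ·) (PySem.Set.ofList xs) := by
  have h1 : List.Pairwise (· ≤ ·) (PySem.Set.ofList xs) := h.sublist (pvOfList_sublist xs)
  have h2 : List.Pairwise (· ≠ ·) (PySem.Set.ofList xs) := PySem.Set.nodup_ofList xs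
  exact (h1.and h2).imp (fun hab => lt_of_le_of_ne hab.1 hab.2)

-- first-occurrence dedup of a block of x followed by a list free of x
theorem pvOfList_block {α : Type} [BEq α] [LawfulBEq α] (x : α) (A B : List α)
    (hA : ∀ a ∈ A, a = x) (hB : x ∉ B) :
    PySem.Set.ofList (x :: (A ++ B)) = x :: PySem.Set.ofList B := by
  have hsplit : x :: (A ++ B) = (x :: A) ++ B := rfl
  rw [hsplit, PySem.Set.ofList_append, PySem.Set.update_eq_append_filter]
  have hxa : PySem.Set.ofList (x :: A) = [x] := by
    rw [PySem.Set.ofList_cons]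
    have hdis : (PySem.Set.ofList A).discard x = [] := by
      simp only [PySem.Set.discard, List.filter_eq_nil_iff]
      intro a ha
      have := hA a ((PySem.Set.mem_ofList A a).mp ha)
      simp [this]
    rw [hdis]
  rw [hxa]
  have hf : List.filter (fun y => !PySem.Set.contains [x] y) (PySem.Set.ofList B)
      = PySem.Set.ofList B := by
    apply List.filter_eq_self.mpr
    intro a ha
    have haB : a ∈ B := (PySem.Set.mem_ofList B a).mp ha
    have hax : a ≠ x := by rintro rfl; exact hB haB
    simp [PySem.Set.contains, hax]
  rw [hf]
  rfl

-- Core decomposition: a list whose first components are nondecreasing is the concatenation,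
-- over its distinct first components in order of appearance, of the filters by each component.
theorem pvFlattenAux (n : Nat) : ∀ (S : List (String × Int × Int)), S.length ≤ n →
    List.Pairwise (fun a b => a.1 ≤ b.1) S →
    ((PySem.Set.ofList (S.map (·.1))).map
      (fun c => S.filter (fun x => x.1 == c))).flatten = S := by
  induction n with
  | zero =>
    intro S hS _
    have : S = [] := List.eq_nil_of_length_eq_zero (Nat.le_zero.mp hS)
    subst this; simp [PySem.Set.ofList_nil]
  | succ n ih =>
    intro S hS h
    match S with
    | [] => simp [PySem.Set.ofList_nil]
    | x :: T =>
      have hA' := List.takeWhile_append_dropWhile (p := fun y : String × Int × Int => y.1 == x.1) (l := T)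
      set A := T.takeWhile (fun y => y.1 == x.1) with hAdef
      set B := T.dropWhile (fun y => y.1 == x.1) with hBdef
      have hTAB : T = A ++ B := hA'.symm
      have hAx : ∀ a ∈ A, a.1 = x.1 := by
        intro a ha
        have := List.mem_takeWhile_imp ha
        simpa using this
      have hxT : ∀ b ∈ T, x.1 ≤ b.1 := fun b hb => (List.pairwise_cons.mp h).1 b hb
      have hpT : List.Pairwise (fun a b => a.1 ≤ b.1) T := (List.pairwise_cons.mp h).2
      have hpB : List.Pairwise (fun a b => a.1 ≤ b.1) B := by
        rw [hTAB] at hpT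
        exact hpT.sublist (List.sublist_append_right A B)
      have hBne : ∀ b ∈ B, x.1 ≠ b.1 := by
        intro b hb
        match hB : B, hb with
        | b0 :: B', hb =>
          have hb0 : ¬ (b0.1 == x.1) = true := by
            have hhd := List.head?_dropWhile_not (p := fun y : String × Int × Int => y.1 == x.1) (l := T)
            rw [← hBdef, hB] at hhd
            simpa using hhd
          have hb0x : b0.1 ≠ x.1 := by simpa using hb0
          have hxb0 : x.1 < b0.1 := by
            have hle : x.1 ≤ b0.1 := hxT b0 (by rw [hTAB, hB]; simp)
            exact lt_of_le_of_ne hle (Ne.symm hb0x)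
          rw [hB] at hpB
          cases hb with
          | head => exact ne_of_lt hxb0
          | tail _ hb' =>
            have hb0b : b0.1 ≤ b.1 := (List.pairwise_cons.mp hpB).1 b hb'
            exact ne_of_lt (lt_of_lt_of_le hxb0 hb0b)
      have hmap : (x :: T).map (·.1) = x.1 :: (A.map (·.1) ++ B.map (·.1)) := by
        rw [hTAB]; simp
      have hofl : PySem.Set.ofList ((x :: T).map (·.1)) = x.1 :: PySem.Set.ofList (B.map (·.1)) := by
        rw [hmap]
        apply pvOfList_block
        · intro a ha
          obtain ⟨y, hy, rfl⟩ := List.mem_map.mp ha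
          exact hAx y hy
        · intro hx
          obtain ⟨y, hy, hyx⟩ := List.mem_map.mp hx
          exact hBne y hy hyx.symm
      have hfilx : (x :: T).filter (fun y => y.1 == x.1) = x :: A := by
        rw [hTAB]
        have h1 : (x :: (A ++ B)).filter (fun y => y.1 == x.1)
            = x :: (A.filter (fun y => y.1 == x.1) ++ B.filter (fun y => y.1 == x.1)) := by
          simp [List.filter_append]
        rw [h1, List.filter_eq_self.mpr (by intro a ha; simp [hAx a ha]),
            List.filter_eq_nil_iff.mpr (by intro b hb hc; exact hBne b hb (show b.1 = x.1 by simpa using hc).symm)]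
        simp
      have hfilc : ∀ c ∈ PySem.Set.ofList (B.map (·.1)),
          (x :: T).filter (fun y => y.1 == c) = B.filter (fun y => y.1 == c) := by
        intro c hc
        have hcB : c ∈ B.map (·.1) := (PySem.Set.mem_ofList _ c).mp hc
        obtain ⟨y, hy, rfl⟩ := List.mem_map.mp hcB
        have hxc : x.1 ≠ y.1 := hBne y hy
        rw [hTAB]
        rw [show (x :: (A ++ B)) = [x] ++ A ++ B by simp, List.filter_append, List.filter_append,
            List.filter_eq_nil_iff.mpr (by intro a ha; simp at ha; subst ha; simpa using hxc),
            List.filter_eq_nil_iff.mpr (by intro a ha hc'; exact hxc (by rw [← hAx a ha]; simpa using hc'))]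
        simp
      rw [hofl, List.map_cons, List.flatten_cons, hfilx,
          List.map_congr_left hfilc]
      have hBlen : B.length ≤ n := by
        have : T.length ≤ n := Nat.le_of_succ_le_succ (by simpa using hS)
        calc B.length ≤ T.length := by rw [hTAB]; simp
          _ ≤ n := this
      rw [ih B hBlen hpB, hTAB]
      simp

theorem pvFlatten_filter (S : List (String × Int × Int))
    (h : List.Pairwise (fun a b => a.1 ≤ b.1) S) :
    ((PySem.Set.ofList (S.map (·.1))).map
      (fun c => S.filter (fun x => x.1 == c))).flatten = S :=
  pvFlattenAux S.length S le_rfl h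

-- ===== VERDICT (by name: the statement is the Claim_ definition above) =====
set_option maxHeartbeats 1000000 in
theorem format_chimerax_selection_spec : Claim_equal_format_chimerax_selection := by
  intro ranges _hdom
  unfold Spec_format_chimerax_selection
  by_cases hr : ranges = []
  · subst hr; rfl
  · simp only [format_chimerax_selection, format_chimerax_selection_alt, if_neg hr,
      PySem.List.foldl_append_singleton_eq_map, List.nil_append]
    set S := PySem.List.sorted ranges pvKeyB with hSdef
    have hSperm : S.Perm ranges := PySem.List.sorted_perm ranges pvKeyB false
    have hSpair : List.Pairwise (fun a b => pvKeyB a ≤ pvKeyB b) S :=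
      PySem.List.sorted_pairwise ranges pvKeyB
    have hchains : List.Pairwise (fun a b : String × Int × Int => a.1 ≤ b.1) S := by
      refine hSpair.imp ?_
      intro a b hab
      simp only [pvKeyB] at hab
      rcases Prod.Lex.toLex_le_toLex.mp hab with h | h
      · exact le_of_lt h
      · exact le_of_eq h.1
    set D := PySem.Set.ofList (S.map (·.1)) with hDdef
    have hDlt : List.Pairwise (· < ·) D :=
      pvOfList_pairwise_lt _ (List.pairwise_map.mpr hchains)
    have hkeys : (ranges.foldl (fun d p => d.modify p.1 [] (fun l => l ++ [p.2]))
        PySem.Dict.empty).keys = PySem.Set.ofList (ranges.map (·.1)) := by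
      rw [PySem.Dict.keys_foldl_modify_key ranges (·.1) [] (fun _ p => fun l => l ++ [p.2])
        PySem.Dict.empty, PySem.Dict.keys_empty, PySem.Set.update_nil_left]
    have hgetD : ∀ c, (ranges.foldl (fun d p => d.modify p.1 [] (fun l => l ++ [p.2]))
        PySem.Dict.empty).getD c [] = (ranges.filter (fun p => p.1 == c)).map (·.2) := by
      intro c
      rw [PySem.Dict.getD_foldl_modify_append ranges PySem.Dict.empty c, PySem.Dict.getD_empty]
      rfl
    have hperm : D.Perm (PySem.Set.ofList (ranges.map (·.1))) := by
      rw [List.perm_ext_iff_of_nodup (PySem.Set.nodup_ofList _) (PySem.Set.nodup_ofList _)]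
      intro c
      rw [show (c ∈ PySem.Set.ofList (S.map (·.1))) ↔ c ∈ S.map (·.1) from PySem.Set.mem_ofList _ _,
          show (c ∈ PySem.Set.ofList (ranges.map (·.1))) ↔ c ∈ ranges.map (·.1) from PySem.Set.mem_ofList _ _]
      exact (hSperm.map (·.1)).mem_iff
    have hsortk : PySem.List.sorted (PySem.Set.ofList (ranges.map (·.1))) (fun c => c) = D :=
      PySem.List.sorted_eq_of_perm_of_pairwise_lt _ D (fun c => c) hperm hDlt
    have hne : ∀ c ∈ D, S.filter (fun x => x.1 == c) ≠ [] := by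
      intro c hc hnil
      have hcm : c ∈ S.map (·.1) := (PySem.Set.mem_ofList _ _).mp hc
      obtain ⟨y, hy, rfl⟩ := List.mem_map.mp hcm
      have hyf : y ∈ S.filter (fun x => x.1 == y.1) := List.mem_filter.mpr ⟨hy, by simp⟩
      rw [hnil] at hyf
      simp at hyf
    have hmemfil : ∀ c : String, ∀ z ∈ S.filter (fun x => x.1 == c), z.1 = c := by
      intro c z hz
      have := (List.mem_filter.mp hz).2
      simpa using this
    have hsplit : S.splitBy (fun a b => a.1 == b.1) = D.map (fun c => S.filter (fun x => x.1 == c)) := by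
      conv_lhs => rw [← pvFlatten_filter S hchains]
      apply List.splitBy_flatten
      · intro hmem
        obtain ⟨c, hc, hcnil⟩ := List.mem_map.mp hmem
        exact hne c hc hcnil
      · intro g hg
        obtain ⟨c, hc, rfl⟩ := List.mem_map.mp hg
        refine (List.pairwise_of_forall_mem_list ?_).isChain
        intro a ha b hb
        simp [hmemfil c a ha, hmemfil c b hb]
      · refine List.Pairwise.isChain ?_
        refine List.pairwise_map.mpr ?_
        refine hDlt.imp_of_mem ?_
        intro c c' hc hc' hlt
        refine ⟨hne c hc, hne c' hc', ?_⟩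
        have h1 := hmemfil c _ (List.getLast_mem (hne c hc))
        have h2 := hmemfil c' _ (List.head_mem (hne c' hc'))
        simp only [h1, h2]
        simpa using ne_of_lt hlt
    have hsortpair : ∀ c ∈ D,
        PySem.List.sorted ((ranges.filter (fun p => p.1 == c)).map (·.2)) (fun p => toLex p)
          = (S.filter (fun x => x.1 == c)).map (·.2) := by
      intro c hc
      have hanti : ∀ (a b : Int × Int),
          a ∈ PySem.List.sorted ((ranges.filter (fun p => p.1 == c)).map (·.2)) (fun p => toLex p) →
          b ∈ (S.filter (fun x => x.1 == c)).map (·.2) →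
          toLex a ≤ toLex b → toLex b ≤ toLex a → a = b := by
        intro a b _ _ h1 h2
        exact toLex_inj.mp (le_antisymm h1 h2)
      have hp1 : List.Pairwise (fun a b : Int × Int => toLex a ≤ toLex b)
          (PySem.List.sorted ((ranges.filter (fun p => p.1 == c)).map (·.2)) (fun p => toLex p)) :=
        PySem.List.sorted_pairwise _ _
      have hp2 : List.Pairwise (fun a b : Int × Int => toLex a ≤ toLex b)
          ((S.filter (fun x => x.1 == c)).map (·.2)) := by
        refine List.pairwise_map.mpr ?_
        have hfp : List.Pairwise (fun a b => pvKeyB a ≤ pvKeyB b) (S.filter (fun x => x.1 == c)) :=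
          hSpair.sublist List.filter_sublist
        refine hfp.imp_of_mem ?_
        intro a b ha hb hab
        have ha1 : a.1 = c := hmemfil c a ha
        have hb1 : b.1 = c := hmemfil c b hb
        simp only [pvKeyB] at hab
        rcases Prod.Lex.toLex_le_toLex.mp hab with h | h
        · rw [ha1, hb1] at h
          exact absurd h (lt_irrefl _)
        · exact h.2
      have hpm : (PySem.List.sorted ((ranges.filter (fun p => p.1 == c)).map (·.2))
          (fun p => toLex p)).Perm ((S.filter (fun x => x.1 == c)).map (·.2)) :=
        (PySem.List.sorted_perm _ _ false).trans (((hSperm.filter _).map _).symm)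
      exact hpm.eq_of_pairwise hanti hp1 hp2
    rw [hkeys, hsortk, hsplit, List.map_map]
    congr 1
    apply List.map_congr_left
    intro c hc
    have hgne := hne c hc
    obtain ⟨z, t, hzt⟩ : ∃ z t, S.filter (fun x => x.1 == c) = z :: t := by
      cases hfil : S.filter (fun x => x.1 == c) with
      | nil => exact absurd hfil hgne
      | cons z t => exact ⟨z, t, rfl⟩
    have hz1 : z.1 = c := hmemfil c z (by rw [hzt]; exact List.mem_cons_self ..)
    simp only [hgetD, hsortpair c hc, Function.comp, hzt, List.headD_cons, hz1, List.map_map]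
    rfl
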